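-- pv_equiv track=rewrite | github.com/khuang08/Python | CodeWars/5kyu_play_with_two_strings.py | work_on_strings
-- ===== SOURCE A (Python) =====
-- def work_on_strings(a,b):
-- 	temp_a = [x for x in a]
-- 	temp_b = [y for y in b]
--
-- 	for i in range(len(temp_a)):
-- 		for j in range(len(temp_b)):
-- 			if temp_a[i].lower() == temp_b[j].lower():
-- 				if temp_b[j].islower():
-- 					temp_b[j] = temp_b[j].upper()
-- 				else:
-- 					temp_b[j] = temp_b[j].lower()
--
-- 	for i in range(len(temp_b)):
-- 		for j in range(len(temp_a)):
-- 			if temp_b[i].lower() == temp_a[j].lower():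
-- 				if temp_a[j].islower():
-- 					temp_a[j] = temp_a[j].upper()
-- 				else:
-- 					temp_a[j] = temp_a[j].lower()
--
-- 	result = ''.join(temp_a) + ''.join(temp_b)
-- 	return result
-- ===== SOURCE B (Python) =====
-- def work_on_strings(a, b):
--     # Count case-insensitive character frequencies of each string once,
--     # then flip the case of a character iff the other string contains an
--     # odd number of case-insensitive occurrences of it.  O(n+m) vs A's O(n*m).
--     ca = {}
--     for k in map(str.lower, a):
--         ca[k] = ca.get(k, 0) + 1
--     cb = {}
--     for k in map(str.lower, b):
--         cb[k] = cb.get(k, 0) + 1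
--     out_a = ''.join(ch.swapcase() if cb.get(ch.lower(), 0) % 2 else ch for ch in a)
--     out_b = ''.join(ch.swapcase() if ca.get(ch.lower(), 0) % 2 else ch for ch in b)
--     return out_a + out_b
-- ===== Notes on version B (the rewrite author's own statement) =====
-- stated objective: faster
-- what changed: Replaced A's two quadratic nested index loops (each character of one string scanned against every character of the other, toggling case in place on every match) by one case-insensitive frequency dictionary per string and a single pass that swaps a character's case iff the other string's count of it is odd.
import Mathlib
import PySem

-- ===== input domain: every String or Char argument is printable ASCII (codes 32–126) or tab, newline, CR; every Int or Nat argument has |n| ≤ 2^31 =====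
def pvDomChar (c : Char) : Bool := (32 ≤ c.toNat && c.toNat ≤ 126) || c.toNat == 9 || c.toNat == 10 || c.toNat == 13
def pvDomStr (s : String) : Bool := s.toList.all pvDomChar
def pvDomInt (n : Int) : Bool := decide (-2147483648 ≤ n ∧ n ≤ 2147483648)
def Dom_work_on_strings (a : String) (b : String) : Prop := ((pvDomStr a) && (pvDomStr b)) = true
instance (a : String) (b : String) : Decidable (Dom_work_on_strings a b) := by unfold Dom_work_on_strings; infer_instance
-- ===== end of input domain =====

-- B replaces A's quadratic nested index loops by one case-insensitive frequency
-- count per string and a single parity-driven pass over each string (objective: faster).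

-- ===== PORT A =====
-- A's per-character toggle: "if ch.islower(): ch.upper() else: ch.lower()" on a 1-char string
def pyToggle (c : Char) : Char :=
  if PySem.Chars.islower c then PySem.Chars.upperChar c else PySem.Chars.lowerChar c

-- literal port of A: two nested index loops per phase; temp_x[j] reads are List.getD,
-- temp_x[j] = v is List.set (every index produced by range(len(..)) is in range,
-- so getD's default is never read and set never drops a write)
def work_on_strings (a : String) (b : String) : String :=
  let ta := a.toList
  let tb := b.toList
  let tb2 := (List.range ta.length).foldl (fun tb i =>
      (List.range tb.length).foldl (fun tb j =>
        if PySem.Chars.lowerChar (ta.getD i ' ') == PySem.Chars.lowerChar (tb.getD j ' ')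
        then tb.set j (pyToggle (tb.getD j ' ')) else tb) tb) tb
  let ta2 := (List.range tb2.length).foldl (fun ta i =>
      (List.range ta.length).foldl (fun ta j =>
        if PySem.Chars.lowerChar (tb2.getD i ' ') == PySem.Chars.lowerChar (ta.getD j ' ')
        then ta.set j (pyToggle (ta.getD j ' ')) else ta) ta) ta
  String.ofList (ta2 ++ tb2)

-- ===== PORT B =====
-- Python's ch.swapcase() on a single character
def pySwapcase (c : Char) : Char :=
  if PySem.Chars.islower c then PySem.Chars.upperChar c
  else if PySem.Chars.isupper c then PySem.Chars.lowerChar c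
  else c

-- literal port of B: build a lower-cased frequency dict per string, then one parity pass over each
def work_on_strings_alt (a : String) (b : String) : String :=
  let la := a.toList
  let lb := b.toList
  let ca := (la.map PySem.Chars.lowerChar).foldl
      (fun d k => d.insert k (d.getD k 0 + 1)) (PySem.Dict.empty : PySem.Dict Char Int)
  let cb := (lb.map PySem.Chars.lowerChar).foldl
      (fun d k => d.insert k (d.getD k 0 + 1)) (PySem.Dict.empty : PySem.Dict Char Int)
  let outA := la.map (fun ch =>
      if PySem.Int.mod (cb.getD (PySem.Chars.lowerChar ch) 0) 2 ≠ 0 then pySwapcase ch else ch)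
  let outB := lb.map (fun ch =>
      if PySem.Int.mod (ca.getD (PySem.Chars.lowerChar ch) 0) 2 ≠ 0 then pySwapcase ch else ch)
  String.ofList (outA ++ outB)

-- ===== PRECONDITION & SPEC =====
def Spec_work_on_strings (a : String) (b : String) (out : String) : Prop := out = work_on_strings_alt a b
instance (a : String) (b : String) (out : String) : Decidable (Spec_work_on_strings a b out) := by unfold Spec_work_on_strings; infer_instance

-- ===== CLAIM (what is proved, stated in full; the proofs are below) =====
def Claim_equal_work_on_strings : Prop := ∀ (a : String) (b : String), Dom_work_on_strings a b → Spec_work_on_strings a b (work_on_strings a b)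

-- ===== LEMMAS AND PROOFS =====

-- any property of domain chars can be checked on the 128 ASCII codes
lemma domChar_cases (P : Char → Prop) [DecidablePred P]
    (hall : ∀ n : Nat, n < 128 → P (Char.ofNat n))
    (c : Char) (hc : pvDomChar c = true) : P c := by
  have h128 : c.toNat < 128 := by
    have : (((32 ≤ c.toNat ∧ c.toNat ≤ 126) ∨ c.toNat = 9) ∨ c.toNat = 10) ∨ c.toNat = 13 := by
      simpa only [pvDomChar, Bool.or_eq_true, Bool.and_eq_true, decide_eq_true_eq,
        beq_iff_eq] using hc
    omega
  have := hall c.toNat h128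
  rwa [Char.ofNat_toNat] at this

lemma toggle_toggle (c : Char) (hc : pvDomChar c = true) : pyToggle (pyToggle c) = c :=
  domChar_cases (fun c => pvDomChar c = true → pyToggle (pyToggle c) = c) (by decide) c hc hc

lemma lower_toggle (c : Char) (hc : pvDomChar c = true) :
    PySem.Chars.lowerChar (pyToggle c) = PySem.Chars.lowerChar c :=
  domChar_cases
    (fun c => pvDomChar c = true → PySem.Chars.lowerChar (pyToggle c) = PySem.Chars.lowerChar c)
    (by decide) c hc hc

lemma dom_toggle (c : Char) (hc : pvDomChar c = true) : pvDomChar (pyToggle c) = true :=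
  domChar_cases (fun c => pvDomChar c = true → pvDomChar (pyToggle c) = true)
    (by decide) c hc hc

lemma swapcase_eq_toggle (c : Char) (hc : pvDomChar c = true) : pySwapcase c = pyToggle c :=
  domChar_cases (fun c => pvDomChar c = true → pySwapcase c = pyToggle c) (by decide) c hc hc

-- A's inner index loop sets each position once, from its original value: it is a map
lemma inner_loop_eq_map (q : Char → Bool) (t : Char → Char) (xs : List Char) :
    (List.range xs.length).foldl (fun tb j =>
        if q (tb.getD j ' ') then tb.set j (t (tb.getD j ' ')) else tb) xs
      = xs.map (fun c => if q c then t c else c) := by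
  have key : ∀ n, n ≤ xs.length →
      (List.range n).foldl (fun tb j =>
        if q (tb.getD j ' ') then tb.set j (t (tb.getD j ' ')) else tb) xs
      = (xs.take n).map (fun c => if q c then t c else c) ++ xs.drop n := by
    intro n hn
    induction n with
    | zero => simp
    | succ m ihm =>
      have hm : m ≤ xs.length := by omega
      have hlt : m < xs.length := by omega
      rw [List.range_succ, List.foldl_append, ihm hm]
      set g : Char → Char := fun c => if q c then t c else c with hg
      have hlen : ((xs.take m).map g).length = m := by
        simp [List.length_take, hm]
      have hgetD : ((xs.take m).map g ++ xs.drop m).getD m ' ' = xs[m] := by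
        rw [List.getD, List.getElem?_append_right (by omega), hlen]
        simp [hlt]
      have hdrop : xs.drop m = xs[m] :: xs.drop (m + 1) := List.drop_eq_getElem_cons hlt
      have htake : xs.take (m + 1) = xs.take m ++ [xs[m]] := by
        rw [List.take_add_one]
        simp [List.getElem?_eq_getElem hlt]
      have h1 : List.take (m + 1) (List.map g xs) = List.take m (List.map g xs) ++ [g xs[m]] := by
        rw [List.take_add_one]
        simp [List.getElem?_eq_getElem hlt]
      simp only [List.foldl_cons, List.foldl_nil, hgetD]
      by_cases hq : q xs[m]
      · rw [if_pos hq]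
        rw [List.set_append_right _ _ (by omega), hlen]
        rw [hdrop]
        simp only [Nat.sub_self, List.set_cons_zero, List.map_take, h1]
        simp [hg, hq]
      · rw [if_neg hq]
        rw [htake, List.map_append, List.append_assoc]
        congr 1
        rw [hdrop]
        simp [hg, hq]
  have := key xs.length le_rfl
  simpa using this

-- a loop over range(len(l)) that only reads l[i] is a fold over l
lemma foldl_range_getD {β : Type} (l : List Char) (f : β → Char → β) (init : β) :
    (List.range l.length).foldl (fun s i => f s (l.getD i ' ')) init = l.foldl f init := by
  induction l using List.reverseRecOn generalizing init with
  | nil => simp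
  | append_singleton l c ih =>
    rw [List.length_append, List.length_singleton, List.range_succ, List.foldl_append,
      List.foldl_append]
    have hcong : (List.range l.length).foldl
        (fun s i => f s ((l ++ [c]).getD i ' ')) init
        = (List.range l.length).foldl (fun s i => f s (l.getD i ' ')) init := by
      apply PySem.List.foldl_congr_mem
      intro s i hi
      rw [List.mem_range] at hi
      rw [List.getD_append _ _ _ _ hi]
    simp only [hcong, ih]
    simp [List.getD]

-- folding maps over the state = mapping a pointwise fold
lemma foldl_map_comm (g : Char → Char → Char) (ps xs : List Char) :
    ps.foldl (fun tb p => tb.map (g p)) xs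
      = xs.map (fun c => ps.foldl (fun c p => g p c) c) := by
  induction ps generalizing xs with
  | nil => simp
  | cons p rest ih =>
    simp only [List.foldl_cons, ih, List.map_map]
    rfl

-- the pointwise fold of conditional toggles is decided by the parity of the match count
lemma foldl_toggle_parity (ps : List Char) (c : Char) (hc : pvDomChar c = true) :
    ps.foldl (fun c p =>
        if PySem.Chars.lowerChar p == PySem.Chars.lowerChar c then pyToggle c else c) c
      = if (ps.map PySem.Chars.lowerChar).count (PySem.Chars.lowerChar c) % 2 = 1
        then pyToggle c else c := by
  induction ps generalizing c with
  | nil => simp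
  | cons p rest ih =>
    simp only [List.foldl_cons, List.map_cons, List.count_cons]
    by_cases h : PySem.Chars.lowerChar p == PySem.Chars.lowerChar c
    · rw [if_pos h, ih _ (dom_toggle c hc), lower_toggle c hc, toggle_toggle c hc]
      simp only [h, if_pos]
      by_cases h2 : (rest.map PySem.Chars.lowerChar).count (PySem.Chars.lowerChar c) % 2 = 1
      · rw [if_pos h2, if_neg (by omega)]
      · rw [if_neg h2, if_pos (by omega)]
    · rw [if_neg (by simpa using h)]
      rw [ih _ hc]
      simp only [Bool.not_eq_true] at h
      simp [h]

-- one whole phase of A (outer loop over ps, inner loop over the state) is a parity map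
lemma phase_eq (ps xs : List Char)
    (hxs : ∀ c ∈ xs, pvDomChar c = true) :
    (List.range ps.length).foldl (fun st i =>
      (List.range st.length).foldl (fun st j =>
        if PySem.Chars.lowerChar (ps.getD i ' ') == PySem.Chars.lowerChar (st.getD j ' ')
        then st.set j (pyToggle (st.getD j ' ')) else st) st) xs
    = xs.map (fun c =>
        if (ps.map PySem.Chars.lowerChar).count (PySem.Chars.lowerChar c) % 2 = 1
        then pyToggle c else c) := by
  have hinner : ∀ (p : Char) (st : List Char),
      (List.range st.length).foldl (fun st j =>
        if PySem.Chars.lowerChar p == PySem.Chars.lowerChar (st.getD j ' ')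
        then st.set j (pyToggle (st.getD j ' ')) else st) st
      = st.map (fun c => if PySem.Chars.lowerChar p == PySem.Chars.lowerChar c
          then pyToggle c else c) :=
    fun p st => inner_loop_eq_map
      (fun c => PySem.Chars.lowerChar p == PySem.Chars.lowerChar c) pyToggle st
  simp only [hinner]
  rw [foldl_range_getD ps (fun st p => st.map (fun c =>
    if PySem.Chars.lowerChar p == PySem.Chars.lowerChar c then pyToggle c else c)) xs]
  rw [foldl_map_comm (fun p c =>
    if PySem.Chars.lowerChar p == PySem.Chars.lowerChar c then pyToggle c else c) ps xs]
  exact List.map_congr_left (fun c hc => foldl_toggle_parity ps c (hxs c hc))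

-- ===== VERDICT (by name: the statement is the Claim_ definition above) =====
theorem work_on_strings_spec : Claim_equal_work_on_strings := by
  intro a b hdom
  have hdab : pvDomStr a = true ∧ pvDomStr b = true := by
    simpa only [Dom_work_on_strings, Bool.and_eq_true] using hdom
  have ha : ∀ c ∈ a.toList, pvDomChar c = true := by
    simpa only [pvDomStr, List.all_eq_true] using hdab.1
  have hb : ∀ c ∈ b.toList, pvDomChar c = true := by
    simpa only [pvDomStr, List.all_eq_true] using hdab.2
  unfold Spec_work_on_strings work_on_strings work_on_strings_alt
  simp only []
  set ta := a.toList with hta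
  set tb := b.toList with htb
  -- A, phase 1
  rw [phase_eq ta tb hb]
  set F : List Char → Char → Char := fun ps c =>
    if (ps.map PySem.Chars.lowerChar).count (PySem.Chars.lowerChar c) % 2 = 1
    then pyToggle c else c with hF
  -- lower-invariance of phase 1's output
  have hlow : (tb.map (F ta)).map PySem.Chars.lowerChar = tb.map PySem.Chars.lowerChar := by
    rw [List.map_map]
    apply List.map_congr_left
    intro d hd
    by_cases h : (ta.map PySem.Chars.lowerChar).count (PySem.Chars.lowerChar d) % 2 = 1
    · simpa [hF, h] using lower_toggle d (hb d hd)
    · simp [hF, h]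
  -- A, phase 2
  rw [phase_eq (tb.map (F ta)) ta ha]
  rw [hlow]
  -- B: the dicts are the lower-cased frequency counters
  have hdict : ∀ (l : List Char) (k : Char),
      ((l.map PySem.Chars.lowerChar).foldl (fun d k => d.insert k (d.getD k 0 + 1))
        (PySem.Dict.empty : PySem.Dict Char Int)).getD k 0
      = ((l.map PySem.Chars.lowerChar).count k : Int) := by
    intro l k
    rw [PySem.Dict.getD_foldl_insert_add_one]
    simp
  have hmod : ∀ n : Nat, (PySem.Int.mod (n : Int) 2 ≠ 0) ↔ (n % 2 = 1) := by
    intro n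
    rw [PySem.Int.mod, Int.fmod_eq_emod]
    simp
    omega
  -- each output half of B equals the corresponding parity map of A
  have hhalf : ∀ (l other : List Char), (∀ c ∈ l, pvDomChar c = true) →
      l.map (fun ch =>
        if PySem.Int.mod (((other.map PySem.Chars.lowerChar).foldl
            (fun d k => d.insert k (d.getD k 0 + 1))
            (PySem.Dict.empty : PySem.Dict Char Int)).getD (PySem.Chars.lowerChar ch) 0) 2 ≠ 0
        then pySwapcase ch else ch)
      = l.map (F other) := by
    intro l other hl
    apply List.map_congr_left
    intro c hc
    rw [hdict other (PySem.Chars.lowerChar c)]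
    by_cases h : (other.map PySem.Chars.lowerChar).count (PySem.Chars.lowerChar c) % 2 = 1
    · rw [if_pos ((hmod _).2 h)]
      rw [swapcase_eq_toggle c (hl c hc)]
      simp [hF, h]
    · rw [if_neg (fun hne => h ((hmod _).1 hne))]
      simp [hF, h]
  rw [hhalf ta tb ha, hhalf tb ta hb]
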